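-- pv_equiv track=rewrite | github.com/link-0402/Advanced-Penumbra-Item-Converter | advanced_penumbra_item_converter.py | _resolve_many_ci
-- ===== SOURCE A (Python) =====
-- def _resolve_many_ci(index, rel_paths):
--     resolved = []
--     rel_norms = [rp.replace("\\", "/").lstrip("./").lstrip("/").lower() for rp in rel_paths]
--     for rp in rel_norms:
--         p = index.get(rp)
--         if p:
--             resolved.append(p)
--         for key, ap in index.items():
--             if key.endswith(rp):
--                 resolved.append(ap)
--     # dedupe preserving order
--     out = []
--     seen = set()
--     for p in resolved:
--         if p not in seen:
--             seen.add(p)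
--             out.append(p)
--     return out
-- ===== SOURCE B (Python) =====
-- def _resolve_many_ci(index, rel_paths):
--     # Build, once, a hash index from every suffix of every key to the absolute
--     # paths of the entries having that suffix (in insertion order); each path
--     # is then resolved by a single dict lookup instead of a scan over index.
--     suffix_map = {}
--     for key, ap in index.items():
--         for i in range(len(key) + 1):
--             suffix_map.setdefault(key[i:], []).append(ap)
--     out = []
--     seen = set()
--     for rp in rel_paths:
--         rp = rp.replace("\\", "/").lstrip("./").lstrip("/").lower()
--         p = index.get(rp)
--         if p and p not in seen:
--             seen.add(p)
--             out.append(p)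
--         for ap in suffix_map.get(rp, []):
--             if ap not in seen:
--                 seen.add(ap)
--                 out.append(ap)
--     return out
-- ===== Notes on version B (the rewrite author's own statement) =====
-- stated objective: faster
-- what changed: B precomputes a hash map from every suffix of every index key to the matching absolute paths, so each relative path is resolved by one dict lookup instead of an endswith scan over the whole index, and dedupes while emitting instead of in a final pass.
import Mathlib
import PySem

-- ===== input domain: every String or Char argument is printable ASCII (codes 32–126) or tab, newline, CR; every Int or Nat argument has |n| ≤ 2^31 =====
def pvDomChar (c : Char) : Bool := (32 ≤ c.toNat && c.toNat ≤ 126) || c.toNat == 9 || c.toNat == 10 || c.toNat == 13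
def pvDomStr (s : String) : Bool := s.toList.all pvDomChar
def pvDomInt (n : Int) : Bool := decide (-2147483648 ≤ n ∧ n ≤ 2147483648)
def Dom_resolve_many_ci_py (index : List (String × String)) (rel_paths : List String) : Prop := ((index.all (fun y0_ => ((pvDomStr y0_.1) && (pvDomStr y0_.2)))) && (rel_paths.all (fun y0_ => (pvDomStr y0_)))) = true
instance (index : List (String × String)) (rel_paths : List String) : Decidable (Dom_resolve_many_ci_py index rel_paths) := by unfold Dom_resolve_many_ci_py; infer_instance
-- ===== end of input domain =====

-- B replaces A's per-path endswith scan over the whole index by a suffix→paths hash map built once,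
-- and dedupes while emitting instead of in a final pass (objective: faster).

-- ===== PORT A =====
-- rp.replace("\\","/").lstrip("./").lstrip("/").lower(), shared verbatim by both Pythons;
-- .lstrip(chars) is ported by hand as dropWhile over the given character set (exact).
def normRel (rp : String) : String :=
  PySem.Str.lower (String.ofList
    (((PySem.Str.replace rp "\\" "/").toList.dropWhile (fun c => c = '.' || c = '/')).dropWhile
      (fun c => c = '/')))

def resolve_many_ci_py (index : List (String × String)) (rel_paths : List String) : List String :=
  let d : PySem.Dict String String := PySem.Dict.ofList index
  let rel_norms := rel_paths.map normRel
  let resolved := rel_norms.foldl (fun resolved rp =>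
    let resolved := match d.get? rp with
      | some p => if p ≠ "" then resolved ++ [p] else resolved   -- `if p:`
      | none => resolved
    d.items.foldl (fun res kv =>
      if PySem.Str.endswith kv.1 rp then res ++ [kv.2] else res) resolved) []
  -- dedupe preserving order
  (resolved.foldl (fun (st : List String × PySem.Set String) p =>
      if PySem.Set.contains st.2 p then st else (st.1 ++ [p], PySem.Set.add st.2 p))
    ([], PySem.Set.empty)).1

-- ===== PORT B =====
def resolve_many_ci_py_alt (index : List (String × String)) (rel_paths : List String) : List String :=
  let d : PySem.Dict String String := PySem.Dict.ofList index
  -- suffix_map: for each (key, ap), for i in range(len(key)+1): suffix_map.setdefault(key[i:], []).append(ap)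
  let sm : PySem.Dict String (List String) := d.items.foldl (fun sm kv =>
      (PySem.List.pyRange 0 (PySem.Str.len kv.1 + 1) 1).foldl
        (fun sm i => PySem.Dict.modify sm (PySem.Str.slice kv.1 (some i) none) [] (· ++ [kv.2]))
        sm)
    PySem.Dict.empty
  (rel_paths.foldl (fun (st : List String × PySem.Set String) rp0 =>
      let rp := normRel rp0
      let st := match d.get? rp with
        | some p =>
            if p ≠ "" ∧ ¬ (PySem.Set.contains st.2 p) then (st.1 ++ [p], PySem.Set.add st.2 p)
            else st   -- `if p and p not in seen:`
        | none => st
      (sm.getD rp []).foldl (fun st ap =>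
          if PySem.Set.contains st.2 ap then st else (st.1 ++ [ap], PySem.Set.add st.2 ap)) st)
    ([], PySem.Set.empty)).1

-- ===== PRECONDITION & SPEC =====
def Spec_resolve_many_ci_py (index : List (String × String)) (rel_paths : List String) (out : List String) : Prop := out = resolve_many_ci_py_alt index rel_paths
instance (index : List (String × String)) (rel_paths : List String) (out : List String) : Decidable (Spec_resolve_many_ci_py index rel_paths out) := by unfold Spec_resolve_many_ci_py; infer_instance

-- ===== CLAIM (what is proved, stated in full; the proofs are below) =====
def Claim_equal_resolve_many_ci_py : Prop := ∀ (index : List (String × String)) (rel_paths : List String), Dom_resolve_many_ci_py index rel_paths → Spec_resolve_many_ci_py index rel_paths (resolve_many_ci_py index rel_paths)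

-- ===== LEMMAS AND PROOFS =====

-- the shared dedup step ("if p not in seen: seen.add(p); out.append(p)")
def dStep (st : List String × PySem.Set String) (p : String) : List String × PySem.Set String :=
  if PySem.Set.contains st.2 p then st else (st.1 ++ [p], PySem.Set.add st.2 p)

-- everything A appends for one normalized path rp
def blockOf (d : PySem.Dict String String) (rp : String) : List String :=
  (match d.get? rp with
    | some p => if p ≠ "" then [p] else []
    | none => []) ++
  (d.items.filter (fun kv => PySem.Str.endswith kv.1 rp)).map (·.2)

-- A's inner endswith scan collects exactly the filtered values
theorem endswith_fold_eq (l : List (String × String)) (acc : List String) (rp : String) :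
    l.foldl (fun res kv => if PySem.Str.endswith kv.1 rp then res ++ [kv.2] else res) acc
      = acc ++ (l.filter (fun kv => PySem.Str.endswith kv.1 rp)).map (·.2) := by
  induction l generalizing acc with
  | nil => simp
  | cons kv t ih =>
      rw [List.foldl_cons]
      cases h : PySem.Str.endswith kv.1 rp with
      | true => rw [ih, List.filter_cons]; simp only [h]; simp
      | false => rw [ih, List.filter_cons]; simp only [h]; simp

-- a fold that appends block-by-block builds the flatMap
theorem foldl_append_block (f : String → List String) (l : List String) (acc : List String) :
    l.foldl (fun res rp => res ++ f rp) acc = acc ++ l.flatMap f := by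
  induction l generalizing acc with
  | nil => simp
  | cons x t ih => simp [List.foldl_cons, ih]

-- folding dStep block-by-block is folding it over the concatenation
theorem foldl_dStep_flatMap (f : String → List String) (l : List String)
    (init : List String × PySem.Set String) :
    (l.flatMap f).foldl dStep init = l.foldl (fun st x => (f x).foldl dStep st) init := by
  induction l generalizing init with
  | nil => simp
  | cons x t ih => simp [List.foldl_append, ih]

-- the inner suffix loop of B, over an arbitrary list of start indices
theorem getD_suffix_fold (is : List Int) (m : PySem.Dict String (List String))
    (key ap rp : String) :
    ((is.foldl (fun m i =>
        PySem.Dict.modify m (PySem.Str.slice key (some i) none) [] (· ++ [ap])) m).getD rp [])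
      = m.getD rp [] ++
        List.replicate (is.countP (fun i => decide (PySem.Str.slice key (some i) none = rp))) ap := by
  induction is generalizing m with
  | nil => simp
  | cons i t ih =>
      rw [List.foldl_cons, ih, List.countP_cons]
      by_cases h : PySem.Str.slice key (some i) none = rp
      · rw [h, PySem.Dict.getD_modify_self]
        simp [List.append_assoc, List.replicate_succ]
      · rw [PySem.Dict.getD_modify_of_ne _ _ _ (Ne.symm h)]
        simp [h]

-- a key has rp among its suffixes exactly once iff it endswith rp
theorem countP_range_drop (cs rs : List Char) :
    ((List.range (cs.length + 1)).countP (fun k => decide (cs.drop k = rs)))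
      = if rs <:+ cs then 1 else 0 := by
  by_cases hs : rs <:+ cs
  · rw [if_pos hs]
    have hle : rs.length ≤ cs.length := hs.length_le
    have hcongr : ∀ k ∈ List.range (cs.length + 1),
        (decide (cs.drop k = rs)) = (k == cs.length - rs.length) := by
      intro k hk
      rw [List.mem_range] at hk
      apply Bool.coe_iff_coe.mp
      simp only [decide_eq_true_eq, beq_iff_eq]
      constructor
      · intro h
        have := congrArg List.length h
        simp [List.length_drop] at this
        omega
      · intro h
        subst h
        exact (List.suffix_iff_eq_drop.mp hs).symm
    rw [List.countP_congr (fun x hx => by rw [hcongr x hx])]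
    have : (List.range (cs.length + 1)).countP (fun k => k == cs.length - rs.length)
        = (List.range (cs.length + 1)).count (cs.length - rs.length) := by
      simp [List.count]
    rw [this]
    exact List.count_eq_one_of_mem (List.nodup_range) (List.mem_range.mpr (by omega))
  · rw [if_neg hs]
    rw [List.countP_eq_zero]
    intro k _
    simp only [decide_eq_true_eq]
    intro h
    exact hs (h ▸ List.drop_suffix k cs)

theorem countP_suffix (key rp : String) :
    ((PySem.List.pyRange 0 (PySem.Str.len key + 1) 1).countP
        (fun i => decide (PySem.Str.slice key (some i) none = rp)))
      = if PySem.Str.endswith key rp then 1 else 0 := by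
  rw [PySem.Str.len_eq, PySem.List.pyRange_one]
  have h1 : ((key.toList.length : Int) + 1 - 0).toNat = key.toList.length + 1 := by omega
  rw [h1, List.countP_map]
  have h2 : ∀ k ∈ List.range (key.toList.length + 1),
      ((fun i => decide (PySem.Str.slice key (some i) none = rp)) ∘ (fun k : Nat => (0 : Int) + k)) k
        = (fun k => decide (key.toList.drop k = rp.toList)) k := by
    intro k _
    simp only [Function.comp, zero_add]
    congr 1
    rw [show (PySem.Str.slice key (some (k:Int)) none = rp) ↔ ((PySem.Str.slice key (some (k:Int)) none).toList = rp.toList) from String.toList_inj.symm]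
    simp [PySem.List.slice_from_natCast]
  rw [List.countP_congr (fun x hx => by rw [h2 x hx]), countP_range_drop]
  rw [PySem.Str.endswith_eq]
  by_cases hs : rp.toList <:+ key.toList
  · rw [if_pos hs, if_pos (PySem.Chars.endswith_iff _ _ |>.mpr hs)]
  · rw [if_neg hs, if_neg (by rw [PySem.Chars.endswith_iff]; exact hs)]

-- B's suffix map looked up at rp is exactly A's endswith filter
theorem suffix_map_getD (l : List (String × String)) (m : PySem.Dict String (List String))
    (rp : String) :
    ((l.foldl (fun sm kv =>
        (PySem.List.pyRange 0 (PySem.Str.len kv.1 + 1) 1).foldl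
          (fun sm i => PySem.Dict.modify sm (PySem.Str.slice kv.1 (some i) none) [] (· ++ [kv.2]))
          sm) m).getD rp [])
      = m.getD rp [] ++ (l.filter (fun kv => PySem.Str.endswith kv.1 rp)).map (·.2) := by
  induction l generalizing m with
  | nil => simp
  | cons kv t ih =>
      rw [List.foldl_cons, ih, getD_suffix_fold, countP_suffix]
      cases h : PySem.Str.endswith kv.1 rp with
      | true => rw [List.filter_cons]; simp only [h]; simp [List.append_assoc]
      | false => rw [List.filter_cons]; simp only [h]; simp

-- A's value, re-expressed as one dedup fold over the concatenated blocks
theorem portA_eq (index : List (String × String)) (rel_paths : List String) :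
    resolve_many_ci_py index rel_paths
      = ((rel_paths.flatMap (fun rp0 => blockOf (PySem.Dict.ofList index) (normRel rp0))).foldl
          dStep ([], PySem.Set.empty)).1 := by
  have hres : (rel_paths.map normRel).foldl (fun resolved rp =>
      (PySem.Dict.ofList index).items.foldl (fun res kv =>
        if PySem.Str.endswith kv.1 rp then res ++ [kv.2] else res)
        (match (PySem.Dict.ofList index).get? rp with
          | some p => if p ≠ "" then resolved ++ [p] else resolved
          | none => resolved)) []
      = rel_paths.flatMap (fun rp0 => blockOf (PySem.Dict.ofList index) (normRel rp0)) := by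
    rw [List.foldl_map]
    rw [PySem.List.foldl_congr_mem _ _
      (fun res rp0 => res ++ blockOf (PySem.Dict.ofList index) (normRel rp0)) _ ?_]
    · rw [foldl_append_block]; simp
    · intro acc rp0 _
      rw [endswith_fold_eq]
      unfold blockOf
      cases hg : (PySem.Dict.ofList index).get? (normRel rp0) with
      | none => simp [hg]
      | some p => by_cases hp : p = "" <;> simp [hg, hp]
  unfold resolve_many_ci_py
  dsimp only
  rw [hres]
  have hfun : (fun (st : List String × PySem.Set String) p =>
      if PySem.Set.contains st.2 p then st else (st.1 ++ [p], PySem.Set.add st.2 p)) = dStep := rfl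
  rw [hfun]

-- B's value is the same dedup fold
theorem portB_eq (index : List (String × String)) (rel_paths : List String) :
    resolve_many_ci_py_alt index rel_paths
      = ((rel_paths.flatMap (fun rp0 => blockOf (PySem.Dict.ofList index) (normRel rp0))).foldl
          dStep ([], PySem.Set.empty)).1 := by
  unfold resolve_many_ci_py_alt
  dsimp only
  rw [foldl_dStep_flatMap]
  congr 1
  apply PySem.List.foldl_congr_mem
  intro st rp0 _
  have hsm := suffix_map_getD (PySem.Dict.ofList index).items PySem.Dict.empty (normRel rp0)
  simp only [PySem.Dict.getD_empty, List.nil_append] at hsm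
  unfold blockOf
  rw [List.foldl_append, hsm]
  have hfun : (fun (st : List String × PySem.Set String) ap =>
      if PySem.Set.contains st.2 ap then st else (st.1 ++ [ap], PySem.Set.add st.2 ap)) = dStep := rfl
  rw [hfun]
  congr 1
  cases hg : (PySem.Dict.ofList index).get? (normRel rp0) with
  | none => simp
  | some p =>
      by_cases hp : p = ""
      · simp [hp]
      · by_cases hc : PySem.Set.contains st.2 p
        · simp [hp, dStep]
        · simp [hp, dStep]

-- ===== VERDICT (by name: the statement is the Claim_ definition above) =====
theorem resolve_many_ci_py_spec : Claim_equal_resolve_many_ci_py := by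
  intro index rel_paths _
  unfold Spec_resolve_many_ci_py
  rw [portA_eq, portB_eq]
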